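-- pv_equiv track=rewrite | github.com/MinhHaDuong/aedist | mergetables/mergetables.py | extract_th_content
-- ===== SOURCE A (Python) =====
-- def extract_th_content(line):
--     """Extract content from <th> tags in a line."""
--     headers = []
--     start = 0
--     while True:
--         start = line.find('<th>', start)
--         if start == -1:
--             break
--         end = line.find('</th>', start)
--         if end == -1:
--             break
--         content = line[start + 4:end].strip()
--         headers.append(content)
--         start = end + 5
--     return headers
-- ===== SOURCE B (Python) =====
-- def extract_th_content(line):
--     """Extract content from <th> tags in a line."""
--     headers = []
--     rest = line
--     while True:
--         _, sep, rest = rest.partition('<th>')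
--         if not sep:
--             break
--         content, sep2, rest = rest.partition('</th>')
--         if not sep2:
--             break
--         headers.append(content.strip())
--     return headers
-- ===== Notes on version B (the rewrite author's own statement) =====
-- stated objective: alternative
-- what changed: Replaces the index-tracking while loop over find(sub, start) with repeated str.partition that consumes the string suffix by suffix, keeping no positions at all.
import Mathlib
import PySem

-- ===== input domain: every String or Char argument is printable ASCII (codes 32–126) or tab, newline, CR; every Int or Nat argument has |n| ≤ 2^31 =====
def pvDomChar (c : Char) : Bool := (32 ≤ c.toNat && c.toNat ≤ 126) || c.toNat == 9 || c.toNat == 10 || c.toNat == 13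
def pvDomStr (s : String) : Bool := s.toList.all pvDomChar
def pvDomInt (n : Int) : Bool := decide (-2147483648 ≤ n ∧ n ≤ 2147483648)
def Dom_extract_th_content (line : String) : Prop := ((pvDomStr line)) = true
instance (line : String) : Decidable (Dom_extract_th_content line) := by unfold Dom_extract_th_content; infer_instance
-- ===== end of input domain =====

-- B replaces A's index-tracking find(sub, start) loop by repeated str.partition on the shrinking suffix; return values proved equal.

-- ===== PORT A =====
-- the two tag literals '<th>' and '</th>'
def pvTh : List Char := ['<', 't', 'h', '>']
def pvThEnd : List Char := ['<', '/', 't', 'h', '>']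

-- A's 'while True' loop, made total with a fuel counter (len+1 steps always suffice, as the
-- equivalence proof shows: each iteration advances 'start' by at least 9):
-- start = line.find('<th>', start); end = line.find('</th>', start);
-- headers.append(line[start+4:end].strip()); start = end + 5
def pvLoopA (s : List Char) : Nat → List String → Nat → List String
  | 0, headers, _ => headers
  | fuel + 1, headers, start =>
    if PySem.Chars.findFrom s pvTh (start : Int) none = -1 then headers
    else if PySem.Chars.findFrom s pvThEnd (PySem.Chars.findFrom s pvTh (start : Int) none) none = -1 then headers
    else
      pvLoopA s fuel
        (headers ++ [String.ofList (PySem.Chars.strip (PySem.List.slice s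
          (some (PySem.Chars.findFrom s pvTh (start : Int) none + 4))
          (some (PySem.Chars.findFrom s pvThEnd (PySem.Chars.findFrom s pvTh (start : Int) none) none))))])
        ((PySem.Chars.findFrom s pvThEnd (PySem.Chars.findFrom s pvTh (start : Int) none) none).toNat + 5)

def extract_th_content (line : String) : List String :=
  pvLoopA line.toList (line.toList.length + 1) [] 0

-- ===== PORT B =====
-- str.partition(sub): (head, sub, tail) around the first occurrence, or (s, '', '') when absent
def pvPartition (s sub : List Char) : List Char × List Char × List Char :=
  let i := PySem.Chars.find s sub
  if i = -1 then (s, [], [])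
  else (s.take i.toNat, sub, s.drop (i.toNat + sub.length))

-- B's 'while True' loop, made total with the same fuel counter:
-- _, sep, rest = rest.partition('<th>'); content, sep2, rest = rest.partition('</th>');
-- headers.append(content.strip())
def pvLoopB : Nat → List Char → List String → List String
  | 0, _, headers => headers
  | fuel + 1, rest, headers =>
    if (pvPartition rest pvTh).2.1 = [] then headers
    else if (pvPartition (pvPartition rest pvTh).2.2 pvThEnd).2.1 = [] then headers
    else
      pvLoopB fuel (pvPartition (pvPartition rest pvTh).2.2 pvThEnd).2.2
        (headers ++ [String.ofList (PySem.Chars.strip (pvPartition (pvPartition rest pvTh).2.2 pvThEnd).1)])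

def extract_th_content_alt (line : String) : List String :=
  pvLoopB (line.toList.length + 1) line.toList []

-- ===== PRECONDITION & SPEC =====
def Spec_extract_th_content (line : String) (out : List String) : Prop := out = extract_th_content_alt line
instance (line : String) (out : List String) : Decidable (Spec_extract_th_content line out) := by unfold Spec_extract_th_content; infer_instance

-- ===== CLAIM (what is proved, stated in full; the proofs are below) =====
def Claim_equal_extract_th_content : Prop := ∀ (line : String), Dom_extract_th_content line → Spec_extract_th_content line (extract_th_content line)

-- ===== LEMMAS AND PROOFS =====

-- a find from a start past the end is -1 (exact CPython behaviour)
theorem pvFindFrom_gt_len (s sub : List Char) (k : Nat) (h : s.length < k) :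
    PySem.Chars.findFrom s sub (k : Int) none = -1 := by
  simp only [PySem.Chars.findFrom]
  have h1 : ¬ ((k : Int) < 0) := by omega
  have h2 : (s.length : Int) < (k : Int) := by exact_mod_cast h
  simp [h1, h2]

-- find characterised by "prefix here, nowhere earlier"
theorem pvFind_eq_of (t sub : List Char) (n : Nat) (hpre : sub <+: t.drop n)
    (hmin : ∀ m < n, ¬ sub <+: t.drop m) : PySem.Chars.find t sub = (n : Int) := by
  have hinf : sub <:+: t := hpre.isInfix.trans (t.drop_suffix n).isInfix
  have h0 : 0 ≤ PySem.Chars.find t sub := (PySem.Chars.find_nonneg_iff t sub).2 hinf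
  obtain ⟨hp, hm⟩ := PySem.Chars.find_spec h0
  have : (PySem.Chars.find t sub).toNat = n := by
    rcases Nat.lt_trichotomy (PySem.Chars.find t sub).toNat n with h | h | h
    · exact absurd hp (hmin _ h)
    · exact h
    · exact absurd hpre (hm n h)
  omega

-- '</th>' cannot start inside a leading '<th>': searching from the '<th>' equals searching just after it
theorem pvOverlap (t : List Char) (h : pvTh <+: t) :
    PySem.Chars.find t pvThEnd =
      (if PySem.Chars.find (t.drop 4) pvThEnd = -1 then -1
       else 4 + PySem.Chars.find (t.drop 4) pvThEnd) := by
  obtain ⟨u, rfl⟩ := h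
  have hdrop : (pvTh ++ u).drop 4 = u := by simp [pvTh]
  rw [hdrop]
  have hsmall : ∀ m < 4, ¬ pvThEnd <+: (pvTh ++ u).drop m := by
    intro m hm
    interval_cases m <;> simp [pvTh, pvThEnd, List.cons_prefix_cons]
  have hshift : ∀ m : Nat, (pvTh ++ u).drop (4 + m) = u.drop m := by
    intro m
    rw [← List.drop_drop, hdrop]
  by_cases hu : PySem.Chars.find u pvThEnd = -1
  · rw [if_pos hu, PySem.Chars.find_eq_neg_one_iff]
    rw [PySem.Chars.find_eq_neg_one_iff] at hu
    intro hinf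
    obtain ⟨j, hj⟩ := (PySem.Chars.exists_prefix_drop_iff_isIn pvThEnd (pvTh ++ u)).2
      ((PySem.Chars.isIn_iff_infix pvThEnd (pvTh ++ u)).2 hinf)
    rcases Nat.lt_or_ge j 4 with hj4 | hj4
    · exact hsmall j hj4 hj
    · apply hu
      have hj' : pvThEnd <+: u.drop (j - 4) := by
        rw [← hshift (j - 4), show 4 + (j - 4) = j from by omega]; exact hj
      exact hj'.isInfix.trans (u.drop_suffix (j - 4)).isInfix
  · rw [if_neg hu]
    have h0 : 0 ≤ PySem.Chars.find u pvThEnd := by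
      have := PySem.Chars.neg_one_le_find u pvThEnd; omega
    obtain ⟨hp, hm⟩ := PySem.Chars.find_spec h0
    have heq : PySem.Chars.find (pvTh ++ u) pvThEnd = ((4 + (PySem.Chars.find u pvThEnd).toNat : Nat) : Int) := by
      apply pvFind_eq_of
      · rw [hshift]; exact hp
      · intro m hm4
        rcases Nat.lt_or_ge m 4 with hlt | hge
        · exact hsmall m hlt
        · intro hpre
          apply hm (m - 4) (by omega)
          rw [← hshift (m - 4), show 4 + (m - 4) = m from by omega]
          exact hpre
    rw [heq]
    omega

-- main invariant: A's loop from index 'start' equals B's loop on the suffix line[start:]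
-- (any fuel larger than the remaining length suffices for either loop)
theorem pvLoop_eq (fa : Nat) : ∀ (fb : Nat) (s : List Char) (start : Nat) (headers : List String),
    s.length - start < fa → s.length - start < fb →
    pvLoopA s fa headers start = pvLoopB fb (s.drop start) headers := by
  induction fa with
  | zero => intro fb s start headers ha hb; omega
  | succ fa ih =>
  intro fb s start headers ha hb
  obtain ⟨fb, rfl⟩ : ∃ fb', fb = fb' + 1 := ⟨fb - 1, by omega⟩
  rw [pvLoopA, pvLoopB]
  by_cases hs : s.length < start
  · have hempty : s.drop start = [] := List.drop_eq_nil_of_le (by omega)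
    have hf : PySem.Chars.find ([] : List Char) pvTh = -1 := by decide
    simp [pvFindFrom_gt_len s pvTh start hs, hempty, pvPartition, hf]
  · rw [not_lt] at hs
    rw [PySem.Chars.findFrom_natCast s pvTh start hs]
    by_cases hA1 : PySem.Chars.find (s.drop start) pvTh = -1
    · simp [hA1, pvPartition]
    · have h01 : 0 ≤ PySem.Chars.find (s.drop start) pvTh := by
        have := PySem.Chars.neg_one_le_find (s.drop start) pvTh; omega
      obtain ⟨i, hfi⟩ : ∃ i : Nat, PySem.Chars.find (s.drop start) pvTh = (i : Int) :=
        ⟨(PySem.Chars.find (s.drop start) pvTh).toNat, by omega⟩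
      obtain ⟨hp1, -⟩ := PySem.Chars.find_spec h01
      rw [hfi, Int.toNat_natCast] at hp1
      have hlen1 : start + i + 4 ≤ s.length := by
        have h := hp1.length_le
        have hl : ((s.drop start).drop i).length = s.length - start - i := by simp; omega
        have h4 : pvTh.length = 4 := rfl
        omega
      have hf1 : (if PySem.Chars.find (s.drop start) pvTh = -1 then (-1 : Int)
          else (start : Int) + PySem.Chars.find (s.drop start) pvTh) = ((start + i : Nat) : Int) := by
        rw [if_neg hA1, hfi]; push_cast; ring
      rw [hf1]
      rw [if_neg (show ¬ (((start + i : Nat) : Int) = -1) from by omega)]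
      -- B side: the first partition succeeds and leaves the tail after '<th>'
      have hpart1 : pvPartition (s.drop start) pvTh =
          ((s.drop start).take i, pvTh, (s.drop start).drop (i + 4)) := by
        simp only [pvPartition]
        rw [hfi, if_neg (show ¬ ((i : Int) = -1) from by omega)]
        simp [pvTh]
      rw [hpart1]
      rw [if_neg (show ¬ (pvTh = ([] : List Char)) from by simp [pvTh])]
      -- bring both '</th>' searches to the suffix after this '<th>'
      have hdd : (s.drop start).drop i = s.drop (start + i) := List.drop_drop
      have hdd4 : (s.drop start).drop (i + 4) = s.drop (start + i + 4) := by
        rw [List.drop_drop, ← Nat.add_assoc]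
      have hpre1' : pvTh <+: s.drop (start + i) := by rw [← hdd]; exact hp1
      have hov := pvOverlap (s.drop (start + i)) hpre1'
      have hdrop4 : (s.drop (start + i)).drop 4 = s.drop (start + i + 4) := List.drop_drop
      rw [hdrop4] at hov
      rw [hdd4]
      by_cases hA2 : PySem.Chars.find (s.drop (start + i + 4)) pvThEnd = -1
      · have hfind2 : PySem.Chars.find (s.drop (start + i)) pvThEnd = -1 := by
          rw [hov, if_pos hA2]
        have hf2 : PySem.Chars.findFrom s pvThEnd ((start + i : Nat) : Int) none = -1 := by
          rw [PySem.Chars.findFrom_natCast s pvThEnd (start + i) (by omega), hfind2, if_pos rfl]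
        rw [if_pos hf2]
        simp [pvPartition, hA2]
      · have h02 : 0 ≤ PySem.Chars.find (s.drop (start + i + 4)) pvThEnd := by
          have := PySem.Chars.neg_one_le_find (s.drop (start + i + 4)) pvThEnd; omega
        obtain ⟨j, hfj⟩ : ∃ j : Nat, PySem.Chars.find (s.drop (start + i + 4)) pvThEnd = (j : Int) :=
          ⟨(PySem.Chars.find (s.drop (start + i + 4)) pvThEnd).toNat, by omega⟩
        obtain ⟨hp2, -⟩ := PySem.Chars.find_spec h02
        rw [hfj, Int.toNat_natCast] at hp2
        have hlen2 : start + i + 4 + j + 5 ≤ s.length := by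
          have h := hp2.length_le
          have hl : ((s.drop (start + i + 4)).drop j).length = s.length - (start + i + 4) - j := by
            simp; omega
          have h5 : pvThEnd.length = 5 := rfl
          omega
        have hf2 : PySem.Chars.findFrom s pvThEnd ((start + i : Nat) : Int) none
            = ((start + i + 4 + j : Nat) : Int) := by
          rw [PySem.Chars.findFrom_natCast s pvThEnd (start + i) (by omega), hov, hfj]
          rw [if_neg (show ¬ ((j : Int) = -1) from by omega)]
          rw [if_neg (show ¬ ((4 : Int) + (j : Int) = -1) from by omega)]
          push_cast; ring
        rw [hf2]
        rw [if_neg (show ¬ (((start + i + 4 + j : Nat) : Int) = -1) from by omega)]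
        -- B side: the second partition succeeds
        have hpart2 : pvPartition (s.drop (start + i + 4)) pvThEnd =
            ((s.drop (start + i + 4)).take j, pvThEnd, (s.drop (start + i + 4)).drop (j + 5)) := by
          simp only [pvPartition]
          rw [hfj, if_neg (show ¬ ((j : Int) = -1) from by omega)]
          simp [pvThEnd]
        rw [hpart2]
        rw [if_neg (show ¬ (pvThEnd = ([] : List Char)) from by simp [pvThEnd])]
        -- the appended contents coincide
        have hcontent : PySem.List.slice s (some (((start + i : Nat) : Int) + 4))
            (some ((start + i + 4 + j : Nat) : Int)) = (s.drop (start + i + 4)).take j := by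
          rw [show ((start + i : Nat) : Int) + 4 = ((start + i + 4 : Nat) : Int) from by push_cast; ring]
          rw [PySem.List.slice_natCast]
          rw [show start + i + 4 + j - (start + i + 4) = j from by omega]
        rw [hcontent]
        -- recurse: both loops continue after this '</th>'
        have hdrop5 : (s.drop (start + i + 4)).drop (j + 5) = s.drop (start + i + 4 + j + 5) := by
          rw [List.drop_drop, ← Nat.add_assoc]
        rw [hdrop5, Int.toNat_natCast]
        have hdlen : (s.drop (start + i + 4 + j + 5)).length = s.length - (start + i + 4 + j + 5) := by simp
        exact ih fb s (start + i + 4 + j + 5) _ (by omega) (by omega)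


-- ===== VERDICT (by name: the statement is the Claim_ definition above) =====
theorem extract_th_content_spec : Claim_equal_extract_th_content := by
  intro line _
  unfold Spec_extract_th_content extract_th_content extract_th_content_alt
  have h := pvLoop_eq (line.toList.length + 1) (line.toList.length + 1) line.toList 0 [] (by omega) (by omega)
  simpa using h
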